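-- pv_equiv track=rewrite | github.com/DawsonTheroux/PresidentAI | CardInterfaces.py | decodePlay
-- ===== SOURCE A (Python) =====
-- def decodePlay(codeIndex):
--     # Decode plays by index.
--     # Plays go in order 0 =1; 1=1,1; 44=2; 45=2,2
--     if(codeIndex == 0):
--         return []
--     codeIndex = codeIndex - 1
--     for i in range(14):
--         candidateIndex = i * 4
--         if codeIndex >= candidateIndex and codeIndex <= candidateIndex + 3:
--             break
--
--     numberOfCards = (codeIndex - candidateIndex) + 1
--     card = (candidateIndex / 4) + 1
--     if card == 12:
--         card = 2
--     elif card == 13: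
--         card = 3
--     elif card > 1 and card < 12:
--         card = card + 2
--
--     play = []
--     card = int(card)
--     for i in range(numberOfCards):
--         play.append(card)
--
--     return play
-- ===== SOURCE B (Python) =====
-- def decodePlay(codeIndex):
--     # Closed-form decode: bucket arithmetic replaces the range(14) search loop
--     # and list repetition replaces the append loop.
--     if codeIndex == 0:
--         return []
--     c = codeIndex - 1
--     bucket = min(max(c, 0) // 4, 13)
--     n = c - bucket * 4 + 1
--     card = bucket + 1
--     if 2 <= card <= 11:
--         card += 2
--     elif card == 12:
--         card = 2
--     elif card == 13:
--         card = 3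
--     return [card] * n
-- ===== Notes on version B (the rewrite author's own statement) =====
-- stated objective: simpler
-- what changed: Replaced the range(14) bucket-search loop with direct floor-division arithmetic (with the loop's cap at bucket 13 expressed as min) and replaced the element-by-element append loop with list repetition [card]*n.
import Mathlib
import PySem

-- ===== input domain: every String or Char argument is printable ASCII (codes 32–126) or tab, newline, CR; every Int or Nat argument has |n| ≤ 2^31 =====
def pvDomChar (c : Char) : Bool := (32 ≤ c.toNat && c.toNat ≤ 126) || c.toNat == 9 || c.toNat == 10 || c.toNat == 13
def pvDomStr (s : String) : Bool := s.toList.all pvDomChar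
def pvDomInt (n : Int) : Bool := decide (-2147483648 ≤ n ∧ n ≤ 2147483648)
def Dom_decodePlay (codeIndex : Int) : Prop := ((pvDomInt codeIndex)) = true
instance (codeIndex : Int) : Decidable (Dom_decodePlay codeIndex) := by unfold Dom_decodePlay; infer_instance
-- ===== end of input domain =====

-- ===== PORT A =====
-- decodePlay: B replaces A's range(14) bucket-search loop and append loop by direct
-- bucket arithmetic and list replication (objective: simpler); equal return values proved.

-- one step of A's `for i in range(14): candidateIndex = i*4; if …: break` loop;
-- state = (candidateIndex, broken); after the loop candidateIndex keeps its last value.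
def decodePlayStep (c : Int) (st : Int × Bool) (i : Nat) : Int × Bool :=
  if st.2 then st
  else
    let cand : Int := (i : Int) * 4
    if c ≥ cand ∧ c ≤ cand + 3 then (cand, true) else (cand, false)

def decodePlayLoop (c : Int) : Int :=
  ((List.range 14).foldl (decodePlayStep c) (0, false)).1

def decodePlay (codeIndex : Int) : List Int :=
  if codeIndex = 0 then []
  else
    let c := codeIndex - 1
    let candidateIndex := decodePlayLoop c
    let numberOfCards := (c - candidateIndex) + 1
    -- Python `candidateIndex / 4` is float division, but candidateIndex is a nonnegative
    -- multiple of 4, so `int(card)` equals this exact Int division.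
    let card : Int := candidateIndex / 4 + 1
    let card := if card = 12 then 2 else if card = 13 then 3
                else if card > 1 ∧ card < 12 then card + 2 else card
    -- the append loop `for i in range(numberOfCards): play.append(card)`;
    -- range of a negative count is empty, hence .toNat.
    (List.range numberOfCards.toNat).foldl (fun acc _ => acc ++ [card]) []

-- ===== PORT B =====
def decodePlay_alt (codeIndex : Int) : List Int :=
  if codeIndex = 0 then []
  else
    let c := codeIndex - 1
    let bucket := min (PySem.Int.floordiv (max c 0) 4) 13
    let n := c - bucket * 4 + 1
    let card := bucket + 1
    let card := if 2 ≤ card ∧ card ≤ 11 then card + 2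
                else if card = 12 then 2 else if card = 13 then 3 else card
    -- `[card] * n` is empty for n ≤ 0, hence .toNat
    List.replicate n.toNat card

-- ===== PRECONDITION & SPEC =====
def Spec_decodePlay (codeIndex : Int) (out : List Int) : Prop := out = decodePlay_alt codeIndex
instance (codeIndex : Int) (out : List Int) : Decidable (Spec_decodePlay codeIndex out) := by unfold Spec_decodePlay; infer_instance

-- ===== CLAIM =====
def Claim_equal_decodePlay : Prop := ∀ (codeIndex : Int), Dom_decodePlay codeIndex → Spec_decodePlay codeIndex (decodePlay codeIndex)

-- ===== LEMMAS AND PROOFS =====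

-- if no bucket matches, the loop never breaks and the state tracks the last index seen
theorem foldl_step_no_match (c : Int) (l : List Nat) (a : Int)
    (h : ∀ i ∈ l, ¬(c ≥ (i : Int) * 4 ∧ c ≤ (i : Int) * 4 + 3)) :
    l.foldl (decodePlayStep c) (a, false)
      = (l.foldl (fun _ i => (i : Int) * 4) a, false) := by
  induction l generalizing a with
  | nil => rfl
  | cons i t ih =>
    have hi : ¬(c ≥ (i : Int) * 4 ∧ c ≤ (i : Int) * 4 + 3) := h i (by simp)
    simp only [List.foldl_cons, decodePlayStep, if_neg hi]
    simp only [Bool.false_eq_true, if_false]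
    exact ih _ (fun j hj => h j (by simp [hj]))

theorem decodePlayLoop_no_match (c : Int) (h : c < 0 ∨ 56 ≤ c) : decodePlayLoop c = 52 := by
  unfold decodePlayLoop
  rw [foldl_step_no_match]
  · decide
  · intro i hi
    have : i < 14 := List.mem_range.mp hi
    omega

theorem decodePlay_eq (x : Int) : decodePlay x = decodePlay_alt x := by
  by_cases hx : x = 0
  · subst hx; rfl
  · obtain ⟨c, rfl⟩ : ∃ c : Int, x = c + 1 := ⟨x - 1, by ring⟩
    have hcc : c + 1 - 1 = c := by ring
    by_cases hc : c < 0
    · have hl : decodePlayLoop c = 52 := decodePlayLoop_no_match c (Or.inl hc)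
      have h2 : max c 0 = 0 := by omega
      simp only [decodePlay, decodePlay_alt, if_neg hx, hcc, hl, h2]
      rw [show ((c : Int) - 52 + 1).toNat = 0 from by omega,
          show min (PySem.Int.floordiv 0 4) 13 = 0 from by decide,
          show ((c : Int) - 0 * 4 + 1).toNat = 0 from by omega]
      rfl
    · by_cases h56 : c < 56
      · have hc' : 0 ≤ c := by omega
        have h56' : c ≤ 55 := by omega
        interval_cases c <;> decide
      · have h56' : 56 ≤ c := by omega
        have hl : decodePlayLoop c = 52 := decodePlayLoop_no_match c (Or.inr h56')
        have h2 : max c 0 = c := by omega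
        have h3 : min (PySem.Int.floordiv c 4) 13 = 13 := by
          rw [PySem.Int.floordiv_eq_ediv_of_pos (by omega : (0:Int) < 4)]
          omega
        simp only [decodePlay, decodePlay_alt, if_neg hx, hcc, hl, h2, h3]
        norm_num

-- ===== VERDICT =====
theorem decodePlay_spec : Claim_equal_decodePlay := by
  intro x _
  unfold Spec_decodePlay
  exact decodePlay_eq x
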